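-- pv_equiv track=rewrite | github.com/Vann06/Lab7_TC | ejercicio_1/src/epsilon.py | _variants_without_epsilon
-- ===== SOURCE A (Python) =====
-- from typing import Dict, Set, Tuple, List
--
-- Symbols = Tuple[str, ...]
--
-- def _variants_without_epsilon(body: Symbols, anulables_idx: List[int]) -> List[Symbols]:
--     """
--     Genera todas las variantes de 'body' quitando o dejando
--     las posiciones anulables indicadas. Descarta ε (vacía).
--     """
--     if not anulables_idx:
--         return [body]
--     m = len(anulables_idx)
--     generated = set()
--     for mask in range(1 << m):
--         kept: List[str] = []
--         for i, sym in enumerate(body):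
--             drop = False
--             if i in anulables_idx:
--                 j = anulables_idx.index(i)
--                 if (mask >> j) & 1:
--                     drop = True
--             if not drop:
--                 kept.append(sym)
--         if kept:  # evitamos ε
--             generated.add(tuple(kept))
--     return sorted(generated)
-- ===== SOURCE B (Python) =====
-- def _variants_without_epsilon(body, anulables_idx):
--     if not anulables_idx:
--         return [body]
--
--     def rec(i):
--         if i == len(body):
--             return [()]
--         tails = rec(i + 1)
--         kept = [(body[i],) + t for t in tails]
--         if i in anulables_idx:
--             return kept + tails
--         return kept
--
--     generated = set(rec(0))
--     generated.discard(())
--     return sorted(generated)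
-- ===== Notes on version B (the rewrite author's own statement) =====
-- stated objective: faster
-- what changed: B replaces A's enumeration of all 2^m masks (each rebuilding body with an inner membership scan and list.index call) by a single recursive walk over body that branches only at nullable positions, building variants incrementally and deduplicating once.
import Mathlib
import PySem

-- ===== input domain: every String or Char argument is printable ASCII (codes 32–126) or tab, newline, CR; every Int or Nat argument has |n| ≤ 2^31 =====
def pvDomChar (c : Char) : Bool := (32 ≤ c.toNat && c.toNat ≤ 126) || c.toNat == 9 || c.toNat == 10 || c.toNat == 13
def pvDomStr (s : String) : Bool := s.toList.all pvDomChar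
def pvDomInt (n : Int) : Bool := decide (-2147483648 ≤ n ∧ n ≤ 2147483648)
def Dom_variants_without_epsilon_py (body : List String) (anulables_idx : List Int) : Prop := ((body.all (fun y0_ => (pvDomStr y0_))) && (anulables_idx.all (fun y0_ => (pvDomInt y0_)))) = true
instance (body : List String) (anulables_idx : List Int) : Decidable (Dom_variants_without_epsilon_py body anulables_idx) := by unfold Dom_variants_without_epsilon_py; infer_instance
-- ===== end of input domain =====

-- B (faster): replaces A's enumeration of all 2^len(anulables_idx) masks by one recursive walk
-- over body that branches only at nullable positions; measured faster in a timing run.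


-- ===== PORT A =====
-- A-side helper: the 'drop' decision of A's inner loop (membership test + first-occurrence index + mask bit)
def dropA (anulables_idx : List Int) (mask i : Int) : Bool :=
  if i ∈ anulables_idx then
    match PySem.List.index? anulables_idx i with
    | some j => PySem.Int.band (mask >>> j) 1 == 1
    | none => false
  else false

-- A-side helper: the inner 'for i, sym in enumerate(body)' loop building 'kept' for one mask
def keptA (body : List String) (anulables_idx : List Int) (mask : Int) : List String :=
  (PySem.List.enumerate body 0).foldl
    (fun kept p => if !dropA anulables_idx mask p.1 then kept ++ [p.2] else kept) []

def variants_without_epsilon_py (body : List String) (anulables_idx : List Int) : List (List String) :=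
  if anulables_idx = [] then [body]
  else
    PySem.List.sorted
      ((PySem.List.pyRange 0 (1 <<< anulables_idx.length) 1).foldl
        (fun generated mask =>
          let kept := keptA body anulables_idx mask
          if kept ≠ [] then PySem.Set.add generated kept else generated)
        PySem.Set.empty)
      (fun x => x) false

-- ===== PORT B =====
-- B-side helper: the recursive 'rec(i)' of Source B, walking the suffix of body that starts at index i
def altRec (anulables_idx : List Int) : List String → Int → List (List String)
  | [], _ => [[]]
  | s :: rest, i =>
    let tails := altRec anulables_idx rest (i + 1)
    let kept := tails.map (fun t => s :: t)
    if i ∈ anulables_idx then kept ++ tails else kept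

def variants_without_epsilon_py_alt (body : List String) (anulables_idx : List Int) : List (List String) :=
  if anulables_idx = [] then [body]
  else
    PySem.List.sorted
      (PySem.Set.discard (PySem.Set.ofList (altRec anulables_idx body 0)) [])
      (fun x => x) false

-- ===== PRECONDITION & SPEC =====
def Spec_variants_without_epsilon_py (body : List String) (anulables_idx : List Int) (out : List (List String)) : Prop := out = variants_without_epsilon_py_alt body anulables_idx
instance (body : List String) (anulables_idx : List Int) (out : List (List String)) : Decidable (Spec_variants_without_epsilon_py body anulables_idx out) := by unfold Spec_variants_without_epsilon_py; infer_instance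

-- ===== CLAIM (what is proved, stated in full; the proofs are below) =====
def Claim_equal_variants_without_epsilon_py : Prop := ∀ (body : List String) (anulables_idx : List Int), Dom_variants_without_epsilon_py body anulables_idx → Spec_variants_without_epsilon_py body anulables_idx (variants_without_epsilon_py body anulables_idx)

-- ===== LEMMAS AND PROOFS =====

-- 'filterKeep drop suffix i' = the symbols of 'suffix' (whose first element sits at absolute
-- position i) that survive the drop decision 'drop'
def filterKeep (drop : Int → Bool) : List String → Int → List String
  | [], _ => []
  | s :: rest, i =>
    if drop i then filterKeep drop rest (i + 1) else s :: filterKeep drop rest (i + 1)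

-- A's inner loop is filterKeep with A's drop decision
theorem keptA_eq_filterKeep (anulables_idx : List Int) (mask : Int) :
    ∀ (suffix : List String) (i : Int) (acc : List String),
      (PySem.List.enumerate suffix i).foldl
        (fun kept p => if !dropA anulables_idx mask p.1 then kept ++ [p.2] else kept) acc
      = acc ++ filterKeep (dropA anulables_idx mask) suffix i := by
  intro suffix
  induction suffix with
  | nil => intro i acc; simp [PySem.List.enumerate_nil, filterKeep]
  | cons s rest ih =>
    intro i acc
    rw [PySem.List.enumerate_cons, List.foldl_cons, ih]
    by_cases h : dropA anulables_idx mask i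
    · simp [h, filterKeep]
    · simp [h, filterKeep]

theorem dropA_support (anulables_idx : List Int) (mask i : Int)
    (h : dropA anulables_idx mask i = true) : i ∈ anulables_idx := by
  unfold dropA at h
  by_cases hm : i ∈ anulables_idx
  · exact hm
  · simp [hm] at h

-- filterKeep only consults drop on the positions of the suffix
theorem filterKeep_congr (d d' : Int → Bool) :
    ∀ (suffix : List String) (i : Int),
      (∀ p : Int, i ≤ p → p < i + suffix.length → d p = d' p) →
      filterKeep d suffix i = filterKeep d' suffix i := by
  intro suffix
  induction suffix with
  | nil => intro i _; rfl
  | cons s rest ih =>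
    intro i hag
    have hi : d i = d' i := hag i le_rfl (by simp only [List.length_cons]; push_cast; omega)
    have htail : filterKeep d rest (i + 1) = filterKeep d' rest (i + 1) := by
      apply ih; intro p h1 h2
      apply hag p (by omega) (by simp only [List.length_cons] at h2 ⊢; push_cast at h2 ⊢; omega)
    simp [filterKeep, hi, htail]

-- every filterKeep result with support inside anulables_idx is produced by B's recursion
theorem filterKeep_mem_altRec (anulables_idx : List Int) (d : Int → Bool)
    (hsupp : ∀ p : Int, d p = true → p ∈ anulables_idx) :
    ∀ (suffix : List String) (i : Int),
      filterKeep d suffix i ∈ altRec anulables_idx suffix i := by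
  intro suffix
  induction suffix with
  | nil => intro i; simp [filterKeep, altRec]
  | cons s rest ih =>
    intro i
    by_cases h : d i
    · have hmem : i ∈ anulables_idx := hsupp i h
      have h1 : filterKeep d (s :: rest) i = filterKeep d rest (i + 1) := by
        simp [filterKeep, h]
      rw [h1]
      show _ ∈ altRec anulables_idx (s :: rest) i
      simp only [altRec, hmem, if_true]
      exact List.mem_append_right _ (ih (i + 1))
    · have h1 : filterKeep d (s :: rest) i = s :: filterKeep d rest (i + 1) := by
        simp [filterKeep, h]
      rw [h1]
      show _ ∈ altRec anulables_idx (s :: rest) i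
      simp only [altRec]
      by_cases hmem : i ∈ anulables_idx
      · simp only [hmem, if_true]
        exact List.mem_append_left _ (List.mem_map_of_mem (ih (i + 1)))
      · simp only [hmem, if_false]
        exact List.mem_map_of_mem (ih (i + 1))

-- conversely, everything B's recursion produces is a filterKeep with support inside anulables_idx
theorem altRec_mem (anulables_idx : List Int) :
    ∀ (suffix : List String) (i : Int) (x : List String),
      x ∈ altRec anulables_idx suffix i →
      ∃ d : Int → Bool, (∀ p : Int, d p = true → p ∈ anulables_idx) ∧
        x = filterKeep d suffix i := by
  intro suffix
  induction suffix with
  | nil =>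
    intro i x hx
    simp [altRec] at hx
    exact ⟨fun _ => false, by simp, by simp [hx, filterKeep]⟩
  | cons s rest ih =>
    intro i x hx
    simp only [altRec] at hx
    have hkeep : ∀ t ∈ altRec anulables_idx rest (i + 1),
        ∃ d : Int → Bool, (∀ p : Int, d p = true → p ∈ anulables_idx) ∧
          s :: t = filterKeep d (s :: rest) i := by
      intro t ht
      obtain ⟨d, hd, rfl⟩ := ih (i + 1) t ht
      refine ⟨fun p => if p = i then false else d p, ?_, ?_⟩
      · intro p hp
        by_cases hpi : p = i <;> simp [hpi] at hp ⊢
        · exact hd p hp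
      · have : filterKeep (fun p => if p = i then false else d p) rest (i + 1)
            = filterKeep d rest (i + 1) := by
          apply filterKeep_congr
          intro p h1 h2
          have : p ≠ i := by omega
          simp [this]
        have hstep : filterKeep (fun p => if p = i then false else d p) (s :: rest) i
            = s :: filterKeep (fun p => if p = i then false else d p) rest (i + 1) := by
          show (if (if i = i then false else d i) then _ else _) = _
          simp
        rw [hstep, this]
    by_cases hmem : i ∈ anulables_idx
    · simp only [hmem, if_true] at hx
      rcases List.mem_append.mp hx with hx | hx
      · obtain ⟨t, ht, rfl⟩ := List.mem_map.mp hx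
        exact hkeep t ht
      · obtain ⟨d, hd, rfl⟩ := ih (i + 1) x hx
        refine ⟨fun p => if p = i then true else d p, ?_, ?_⟩
        · intro p hp
          by_cases hpi : p = i
          · exact hpi ▸ hmem
          · simp [hpi] at hp; exact hd p hp
        · have : filterKeep (fun p => if p = i then true else d p) rest (i + 1)
              = filterKeep d rest (i + 1) := by
            apply filterKeep_congr
            intro p h1 h2
            have : p ≠ i := by omega
            simp [this]
          have hstep : filterKeep (fun p => if p = i then true else d p) (s :: rest) i
              = filterKeep (fun p => if p = i then true else d p) rest (i + 1) := by
            show (if (if i = i then true else d i) then _ else _) = _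
            simp
          rw [hstep, this]
    · simp only [hmem, if_false] at hx
      obtain ⟨t, ht, rfl⟩ := List.mem_map.mp hx
      exact hkeep t ht

-- the mask encoding: bit j of 'maskOf d l' is d l[j]
def maskOf (d : Int → Bool) : List Int → Nat
  | [] => 0
  | a :: rest => (if d a then 1 else 0) + 2 * maskOf d rest

theorem maskOf_lt (d : Int → Bool) : ∀ l : List Int, maskOf d l < 2 ^ l.length := by
  intro l
  induction l with
  | nil => simp [maskOf]
  | cons a rest ih =>
    simp only [maskOf, List.length_cons, pow_succ]
    by_cases h : d a <;> simp [h] <;> omega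

theorem maskOf_testBit (d : Int → Bool) :
    ∀ (l : List Int) (j : Nat) (hj : j < l.length),
      Nat.testBit (maskOf d l) j = d l[j] := by
  intro l
  induction l with
  | nil => intro j hj; simp at hj
  | cons a rest ih =>
    intro j hj
    cases j with
    | zero =>
      simp only [maskOf, Nat.testBit_zero, List.getElem_cons_zero]
      by_cases h : d a <;> simp [h]

    | succ j =>
      rw [Nat.testBit_succ]
      have : ((if d a then 1 else 0) + 2 * maskOf d rest) / 2 = maskOf d rest := by
        by_cases h : d a <;> simp [h]; omega
      simp only [maskOf, this, List.getElem_cons_succ]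
      exact ih j (by simpa using Nat.lt_of_succ_lt_succ hj)

-- the Int-level bit test of the ports equals Nat.testBit
theorem band_shift_testBit (n j : Nat) :
    (PySem.Int.band ((n : Int) >>> j) 1 == 1) = Nat.testBit n j := by
  have h1 : ((n : Int) >>> j) = ((n >>> j : Nat) : Int) := by simp
  rw [h1]
  have h2 : PySem.Int.band ((n >>> j : Nat) : Int) 1 = (((n >>> j) &&& 1 : Nat) : Int) := by
    exact_mod_cast PySem.Int.band_natCast (n >>> j) 1
  rw [h2, Nat.and_one_is_mod, Nat.shiftRight_eq_div_pow, Nat.testBit_eq_decide_div_mod_eq]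
  rcases Nat.mod_two_eq_zero_or_one (n / 2 ^ j) with h | h <;> simp [h]

theorem dropA_maskOf (anulables_idx : List Int) (d : Int → Bool)
    (hsupp : ∀ p : Int, d p = true → p ∈ anulables_idx) (p : Int) :
    dropA anulables_idx ((maskOf d anulables_idx : Nat) : Int) p = d p := by
  unfold dropA
  by_cases hmem : p ∈ anulables_idx
  · simp only [hmem, if_true]
    have hsome : (PySem.List.index? anulables_idx p).isSome := by
      rw [PySem.List.index?_isSome_iff]; exact hmem
    obtain ⟨j, hj⟩ := Option.isSome_iff_exists.mp hsome
    obtain ⟨hk, hget, _⟩ := PySem.List.getElem_of_index?_eq_some hj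
    rw [hj]
    simp only
    rw [band_shift_testBit, maskOf_testBit d anulables_idx j hk, hget]
  · simp only [hmem, if_false]
    by_cases hd : d p
    · exact absurd (hsupp p hd) hmem
    · simp [hd]

-- membership in A's accumulated set
theorem genA_mem (K : Int → List String) :
    ∀ (l : List Int) (g : PySem.Set (List String)) (x : List String),
      (x ∈ l.foldl (fun generated mask =>
          let kept := K mask
          if kept ≠ [] then PySem.Set.add generated kept else generated) g)
      ↔ x ∈ g ∨ ∃ mk ∈ l, K mk ≠ [] ∧ K mk = x := by
  intro l
  induction l with
  | nil => intro g x; simp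
  | cons a rest ih =>
    intro g x
    simp only [List.foldl_cons]
    by_cases h : K a ≠ []
    · have hif : (let kept := K a;
          if kept ≠ [] then PySem.Set.add g kept else g) = PySem.Set.add g (K a) := by simp [h]
      rw [hif, ih]
      simp only [PySem.Set.mem_add]
      constructor
      · rintro (⟨hg | rfl⟩ | ⟨mk, hmk, hne, hKx⟩)
        · exact .inl hg
        · exact .inr ⟨a, List.mem_cons_self, h, rfl⟩
        · exact .inr ⟨mk, List.mem_cons_of_mem _ hmk, hne, hKx⟩
      · rintro (hg | ⟨mk, hmk, hne, hKx⟩)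
        · exact .inl (.inl hg)
        · rcases List.mem_cons.mp hmk with rfl | hmk
          · exact .inl (.inr hKx.symm)
          · exact .inr ⟨mk, hmk, hne, hKx⟩
    · have hif : (let kept := K a;
          if kept ≠ [] then PySem.Set.add g kept else g) = g := by simp [not_not.mp h]
      rw [hif, ih]
      replace h := not_not.mp h
      constructor
      · rintro (hg | ⟨mk, hmk, hne, hKx⟩)
        · exact .inl hg
        · exact .inr ⟨mk, List.mem_cons_of_mem _ hmk, hne, hKx⟩
      · rintro (hg | ⟨mk, hmk, hne, hKx⟩)
        · exact .inl hg
        · rcases List.mem_cons.mp hmk with rfl | hmk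
          · exact absurd h hne
          · exact .inr ⟨mk, hmk, hne, hKx⟩

theorem genA_nodup (K : Int → List String) :
    ∀ (l : List Int) (g : PySem.Set (List String)), g.Nodup →
      (l.foldl (fun generated mask =>
          let kept := K mask
          if kept ≠ [] then PySem.Set.add generated kept else generated) g).Nodup := by
  intro l
  induction l with
  | nil => intro g hg; simpa
  | cons a rest ih =>
    intro g hg
    simp only [List.foldl_cons]
    by_cases h : K a ≠ []
    · have hif : (let kept := K a;
          if kept ≠ [] then PySem.Set.add g kept else g) = PySem.Set.add g (K a) := by simp [h]
      rw [hif]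
      exact ih _ (PySem.Set.nodup_add g (K a) hg)
    · have hif : (let kept := K a;
          if kept ≠ [] then PySem.Set.add g kept else g) = g := by simp [not_not.mp h]
      rw [hif]; exact ih g hg

-- ===== VERDICT (by name: the statement is the Claim_ definition above) =====
theorem variants_without_epsilon_py_spec : Claim_equal_variants_without_epsilon_py := by
  intro body anulables_idx _
  unfold Spec_variants_without_epsilon_py
  by_cases hnil : anulables_idx = []
  · simp [variants_without_epsilon_py, variants_without_epsilon_py_alt, hnil]
  · unfold variants_without_epsilon_py variants_without_epsilon_py_alt
    rw [if_neg hnil, if_neg hnil]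
    have hperm : ∀ (xs ys : List (List String)), xs.Nodup → ys.Nodup → (∀ x, x ∈ xs ↔ x ∈ ys) →
        PySem.List.sorted xs (fun x => x) false = PySem.List.sorted ys (fun x => x) false := by
      intro xs ys h1 h2 h3
      have hd : (fun (a b : List String) => a.decidableLT b)
          = (LinearOrder.toDecidableLT : DecidableLT (List String)) := by
        funext a b; exact Subsingleton.elim _ _
      rw [hd]
      exact PySem.List.sorted_eq_sorted_of_perm xs ys (fun x => x) (fun a b h => h)
        ((List.perm_ext_iff_of_nodup h1 h2).mpr h3)
    apply hperm
    · exact genA_nodup _ _ _ (by simp [PySem.Set.empty])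
    · exact PySem.Set.nodup_discard _ _ (PySem.Set.nodup_ofList _)
    · intro x
      rw [genA_mem, PySem.Set.mem_discard, PySem.Set.mem_ofList]
      constructor
      · rintro (hx | ⟨mk, hmk, hne, rfl⟩)
        · simp [PySem.Set.empty] at hx
        · refine ⟨?_, hne⟩
          have : keptA body anulables_idx mk
              = filterKeep (dropA anulables_idx mk) body 0 := by
            unfold keptA
            rw [keptA_eq_filterKeep]
            simp
          rw [this]
          exact filterKeep_mem_altRec anulables_idx _ (dropA_support anulables_idx mk) body 0
      · rintro ⟨hx, hne⟩
        obtain ⟨d, hd, rfl⟩ := altRec_mem anulables_idx body 0 _ hx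
        right
        refine ⟨((maskOf d anulables_idx : Nat) : Int), ?_, ?_, ?_⟩
        · rw [PySem.List.mem_pyRange_one]
          constructor
          · positivity
          · have h1 : maskOf d anulables_idx < 1 <<< anulables_idx.length := by
              rw [Nat.one_shiftLeft]; exact maskOf_lt d anulables_idx
            exact_mod_cast h1
        · have : keptA body anulables_idx ((maskOf d anulables_idx : Nat) : Int)
              = filterKeep d body 0 := by
            unfold keptA
            rw [keptA_eq_filterKeep]
            simp only [List.nil_append]
            apply filterKeep_congr
            intro p _ _
            exact dropA_maskOf anulables_idx d hd p
          rw [this]; exact hne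
        · unfold keptA
          rw [keptA_eq_filterKeep]
          simp only [List.nil_append]
          apply filterKeep_congr
          intro p _ _
          exact dropA_maskOf anulables_idx d hd p
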